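-- pv_equiv track=rewrite | github.com/alecruces/BigData | Counting_triangles_cloudveneto.py | CountTriangles2
-- ===== SOURCE A (Python) =====
-- from collections import defaultdict
--
-- def CountTriangles2(colors_tuple, edges, rand_a, rand_b, p, num_colors):
--     #We assume colors_tuple to be already sorted by increasing colors. Just transform in a list for simplicity
--     colors = list(colors_tuple)
--     #Create a dictionary for adjacency list
--     neighbors = defaultdict(set)
--     #Creare a dictionary for storing node colors
--     node_colors = dict()
--     for edge in edges:
--
--         u, v = edge
--         node_colors[u]= ((rand_a*u+rand_b)%p)%num_colors
--         node_colors[v]= ((rand_a*v+rand_b)%p)%num_colors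
--         neighbors[u].add(v)
--         neighbors[v].add(u)
--
--     # Initialize the triangle count to zero
--     triangle_count = 0
--
--     # Iterate over each vertex in the graph
--     for v in neighbors:
--         # Iterate over each pair of neighbors of v
--         for u in neighbors[v]:
--             if u > v:
--                 for w in neighbors[u]:
--                     # If w is also a neighbor of v, then we have a triangle
--                     if w > u and w in neighbors[v]:
--                         # Sort colors by increasing values
--                         triangle_colors = sorted((node_colors[u], node_colors[v], node_colors[w]))
--                         # If triangle has the right colors, count it.
--                         if colors==triangle_colors:
--                             triangle_count += 1
--     # Return the total number of triangles in the graph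
--     return triangle_count
-- ===== SOURCE B (Python) =====
-- def CountTriangles2(colors_tuple, edges, rand_a, rand_b, p, num_colors):
--     colors = list(colors_tuple)
--
--     def col(x):
--         return ((rand_a * x + rand_b) % p) % num_colors
--
--     # adjacency sets and the set of normalized (min,max) edges, one pass
--     adj = {}
--     eset = set()
--     for a, b in edges:
--         adj.setdefault(a, set()).add(b)
--         adj.setdefault(b, set()).add(a)
--         if a != b:
--             eset.add((a, b) if a < b else (b, a))
--
--     count = 0
--     # node-iterator: for each node v, enumerate ordered pairs (u, w) of its
--     # HIGHER neighbors from a sorted list (so v < u < w automatically) and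
--     # probe the edge set to close the triangle
--     for v in adj:
--         nb = sorted(x for x in adj[v] if x > v)
--         for i in range(len(nb)):
--             u = nb[i]
--             for w in nb[i + 1:]:
--                 if (u, w) in eset and colors == sorted((col(u), col(v), col(w))):
--                     count += 1
--     return count
-- ===== Notes on version B (the rewrite author's own statement) =====
-- stated objective: alternative
-- what changed: B counts triangles by the node-iterator/wedge method: for each node v it sorts v's higher neighbors once and enumerates ordered pairs (u,w) of them, closing the wedge with a membership probe into a prebuilt set of normalized (min,max) edges, instead of A's path extension v->u->w through u's adjacency set with a probe back into N(v); colors come straight from the hash function instead of a node_colors dict.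
import Mathlib
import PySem

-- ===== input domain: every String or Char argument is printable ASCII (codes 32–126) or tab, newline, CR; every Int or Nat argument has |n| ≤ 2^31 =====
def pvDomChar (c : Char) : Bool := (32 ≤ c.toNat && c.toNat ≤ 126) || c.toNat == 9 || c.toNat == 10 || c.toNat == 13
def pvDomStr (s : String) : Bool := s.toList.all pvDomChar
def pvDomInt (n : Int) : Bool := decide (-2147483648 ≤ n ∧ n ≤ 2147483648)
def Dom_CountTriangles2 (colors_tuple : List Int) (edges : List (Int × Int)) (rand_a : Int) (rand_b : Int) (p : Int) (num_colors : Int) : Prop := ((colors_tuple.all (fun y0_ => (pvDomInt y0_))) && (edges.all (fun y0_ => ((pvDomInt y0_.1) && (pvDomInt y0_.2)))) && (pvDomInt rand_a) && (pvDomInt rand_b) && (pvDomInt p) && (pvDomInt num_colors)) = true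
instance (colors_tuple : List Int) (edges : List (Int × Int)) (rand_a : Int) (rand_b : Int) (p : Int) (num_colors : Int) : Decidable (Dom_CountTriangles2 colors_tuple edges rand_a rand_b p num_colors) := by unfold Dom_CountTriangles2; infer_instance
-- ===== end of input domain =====

-- B counts triangles by the node-iterator/wedge method — ordered pairs of each node's sorted higher
-- neighbors, closed by a probe into a normalized (min,max) edge set — instead of A's path extension
-- v→u→w through u's adjacency set probing back into N(v) (objective: alternative).

-- the hash color ((rand_a*x+rand_b) % p) % num_colors (Python '%'; value at divisor 0 excluded by Pre_)
def pvHashColor (rand_a rand_b p num_colors x : Int) : Int :=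
  PySem.Int.mod (PySem.Int.mod (rand_a * x + rand_b) p) num_colors

-- one edge's update of the adjacency dict; A's 'neighbors[u].add(v); neighbors[v].add(u)' on a
-- defaultdict(set) and B's 'adj.setdefault(a, set()).add(b); …' perform exactly this (setdefault
-- inserts the key at the same position the defaultdict access does, then the stored set gains the element)
def pvNbStep (d : PySem.Dict Int (PySem.Set Int)) (e : Int × Int) : PySem.Dict Int (PySem.Set Int) :=
  let d1 := d.insert e.1 (PySem.Set.add (d.getD e.1 PySem.Set.empty) e.2)
  d1.insert e.2 (PySem.Set.add (d1.getD e.2 PySem.Set.empty) e.1)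

-- ===== PORT A =====
-- A's edge loop fills node_colors and neighbors together; node_colors[u]/[v]/[w] in the count loop
-- always hit existing keys (every candidate is an edge endpoint), so getD's default is never taken.
def pvBuildA (rand_a rand_b p num_colors : Int) (edges : List (Int × Int)) :
    PySem.Dict Int Int × PySem.Dict Int (PySem.Set Int) :=
  edges.foldl (fun s e =>
    ((s.1.insert e.1 (pvHashColor rand_a rand_b p num_colors e.1)).insert e.2
        (pvHashColor rand_a rand_b p num_colors e.2),
     pvNbStep s.2 e))
    (PySem.Dict.empty, PySem.Dict.empty)

-- the triangle count aggregates over set iteration, which is order-independent, so iterating the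
-- PySem.Set element lists is exact here
def CountTriangles2 (colors_tuple : List Int) (edges : List (Int × Int)) (rand_a : Int) (rand_b : Int) (p : Int) (num_colors : Int) : Int :=
  let st := pvBuildA rand_a rand_b p num_colors edges
  let node_colors := st.1
  let neighbors := st.2
  (neighbors.keys).foldl (fun acc v =>
    (neighbors.getD v PySem.Set.empty).foldl (fun acc u =>
      if v < u then
        (neighbors.getD u PySem.Set.empty).foldl (fun acc w =>
          if u < w ∧ PySem.Set.contains (neighbors.getD v PySem.Set.empty) w = true then
            if colors_tuple =
                PySem.List.sorted [node_colors.getD u 0, node_colors.getD v 0, node_colors.getD w 0]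
                  (fun x => x) false
            then acc + 1 else acc
          else acc) acc
      else acc) acc) 0

-- ===== PORT B =====
-- B's edge loop: adjacency plus the set of normalized (min,max) endpoint pairs (self-loops skipped)
def pvBuildB (edges : List (Int × Int)) : PySem.Dict Int (PySem.Set Int) × PySem.Set (Int × Int) :=
  edges.foldl (fun s e =>
    (pvNbStep s.1 e,
     if e.1 ≠ e.2 then
       PySem.Set.add s.2 (if e.1 < e.2 then (e.1, e.2) else (e.2, e.1))
     else s.2))
    (PySem.Dict.empty, PySem.Set.empty)

-- B's pair loop 'for i in range(len(nb)): u = nb[i]; for w in nb[i+1:]: …' as the obvious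
-- head/tail recursion over nb with the running count
def pvWedgeLoop (check : Int → Int → Bool) : List Int → Int → Int
  | [], acc => acc
  | u :: rest, acc =>
      pvWedgeLoop check rest (rest.foldl (fun a w => if check u w then a + 1 else a) acc)

-- sorted over the set comprehension '(x for x in adj[v] if x > v)' is order-independent (identity
-- key), so sorting the filtered PySem.Set element list is exact
def CountTriangles2_alt (colors_tuple : List Int) (edges : List (Int × Int)) (rand_a : Int) (rand_b : Int) (p : Int) (num_colors : Int) : Int :=
  let st := pvBuildB edges
  let adj := st.1
  let eset := st.2
  adj.keys.foldl (fun acc v =>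
    pvWedgeLoop (fun u w =>
        PySem.Set.contains eset (u, w) &&
          decide (colors_tuple = PySem.List.sorted
            [pvHashColor rand_a rand_b p num_colors u,
             pvHashColor rand_a rand_b p num_colors v,
             pvHashColor rand_a rand_b p num_colors w] (fun x => x) false))
      (PySem.List.sorted ((adj.getD v PySem.Set.empty).filter (fun x => decide (v < x)))
        (fun x => x) false)
      acc) 0

-- ===== PRECONDITION & SPEC =====
-- Pre_ excludes exactly the inputs where Python A raises ZeroDivisionError: a nonempty edge list
-- forces ((rand_a*u+rand_b) % p) % num_colors, which raises when p = 0 or num_colors = 0.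
def Pre_CountTriangles2 (colors_tuple : List Int) (edges : List (Int × Int)) (rand_a : Int) (rand_b : Int) (p : Int) (num_colors : Int) : Prop :=
  edges = [] ∨ (p ≠ 0 ∧ num_colors ≠ 0)
instance (colors_tuple : List Int) (edges : List (Int × Int)) (rand_a : Int) (rand_b : Int) (p : Int) (num_colors : Int) : Decidable (Pre_CountTriangles2 colors_tuple edges rand_a rand_b p num_colors) := by unfold Pre_CountTriangles2; infer_instance

def pvWitness_CountTriangles2 : List Int × (List (Int × Int)) × Int × Int × Int × Int :=
  ([0, 0, 0], [(1, 2), (2, 3), (1, 3)], 1, 0, 5, 1)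

def Spec_CountTriangles2 (colors_tuple : List Int) (edges : List (Int × Int)) (rand_a : Int) (rand_b : Int) (p : Int) (num_colors : Int) (out : Int) : Prop := out = CountTriangles2_alt colors_tuple edges rand_a rand_b p num_colors
instance (colors_tuple : List Int) (edges : List (Int × Int)) (rand_a : Int) (rand_b : Int) (p : Int) (num_colors : Int) (out : Int) : Decidable (Spec_CountTriangles2 colors_tuple edges rand_a rand_b p num_colors out) := by unfold Spec_CountTriangles2; infer_instance

-- ===== CLAIM (what is proved, stated in full; the proofs are below) =====
def Claim_equal_CountTriangles2 : Prop := ∀ (colors_tuple : List Int) (edges : List (Int × Int)) (rand_a : Int) (rand_b : Int) (p : Int) (num_colors : Int), Dom_CountTriangles2 colors_tuple edges rand_a rand_b p num_colors → Pre_CountTriangles2 colors_tuple edges rand_a rand_b p num_colors → Spec_CountTriangles2 colors_tuple edges rand_a rand_b p num_colors (CountTriangles2 colors_tuple edges rand_a rand_b p num_colors)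

-- ===== LEMMAS AND PROOFS =====

-- proof-side decompositions of the two builds
def pvNcD (rand_a rand_b p num_colors : Int) (edges : List (Int × Int)) : PySem.Dict Int Int :=
  edges.foldl (fun d e =>
    (d.insert e.1 (pvHashColor rand_a rand_b p num_colors e.1)).insert e.2
      (pvHashColor rand_a rand_b p num_colors e.2)) PySem.Dict.empty

def pvNbD (edges : List (Int × Int)) : PySem.Dict Int (PySem.Set Int) :=
  edges.foldl pvNbStep PySem.Dict.empty

def pvPrStep (s : PySem.Set (Int × Int)) (e : Int × Int) : PySem.Set (Int × Int) :=
  if e.1 ≠ e.2 then PySem.Set.add s (if e.1 < e.2 then (e.1, e.2) else (e.2, e.1)) else s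

def pvPrS (edges : List (Int × Int)) : PySem.Set (Int × Int) :=
  edges.foldl pvPrStep PySem.Set.empty

-- x's neighbor set
def pvN (edges : List (Int × Int)) (x : Int) : PySem.Set Int :=
  (pvNbD edges).getD x PySem.Set.empty

-- adjacency as stated on the raw edge list
def pvAdjP (edges : List (Int × Int)) (x y : Int) : Prop :=
  ∃ e ∈ edges, e = (x, y) ∨ e = (y, x)

-- the color-pattern test of a candidate triangle v<u<w
def pvColOK (colors : List Int) (rand_a rand_b p num_colors v u w : Int) : Bool :=
  decide (colors = PySem.List.sorted
    [pvHashColor rand_a rand_b p num_colors u,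
     pvHashColor rand_a rand_b p num_colors v,
     pvHashColor rand_a rand_b p num_colors w] (fun x => x) false)

lemma pvBuildA_eq (rand_a rand_b p num_colors : Int) (edges : List (Int × Int)) :
    pvBuildA rand_a rand_b p num_colors edges =
      (pvNcD rand_a rand_b p num_colors edges, pvNbD edges) := by
  unfold pvBuildA pvNcD pvNbD
  exact PySem.List.foldl_prod_mk
    (fun d (e : Int × Int) =>
      (d.insert e.1 (pvHashColor rand_a rand_b p num_colors e.1)).insert e.2
        (pvHashColor rand_a rand_b p num_colors e.2))
    pvNbStep edges PySem.Dict.empty PySem.Dict.empty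

lemma pvBuildB_eq (edges : List (Int × Int)) :
    pvBuildB edges = (pvNbD edges, pvPrS edges) := by
  unfold pvBuildB pvNbD pvPrS pvPrStep
  exact PySem.List.foldl_prod_mk pvNbStep
    (fun s (e : Int × Int) =>
      if e.1 ≠ e.2 then PySem.Set.add s (if e.1 < e.2 then (e.1, e.2) else (e.2, e.1)) else s)
    edges PySem.Dict.empty PySem.Set.empty

lemma pvAdjP_cons (e : Int × Int) (es : List (Int × Int)) (x y : Int) :
    pvAdjP (e :: es) x y ↔ (e = (x, y) ∨ e = (y, x)) ∨ pvAdjP es x y := by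
  simp [pvAdjP]

-- membership in a neighbor set after the whole build
lemma pv_mem_nbStep (d : PySem.Dict Int (PySem.Set Int)) (e : Int × Int) (x y : Int) :
    y ∈ (pvNbStep d e).getD x PySem.Set.empty ↔
      y ∈ d.getD x PySem.Set.empty ∨ (x = e.1 ∧ y = e.2) ∨ (x = e.2 ∧ y = e.1) := by
  unfold pvNbStep
  simp only [PySem.Dict.getD_insert]
  by_cases h2 : x = e.2 <;> by_cases h1 : x = e.1 <;>
    by_cases he : e.1 = e.2 <;>
    simp [h1, h2, he, PySem.Set.mem_add, (eq_comm : e.2 = e.1 ↔ _)]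

lemma pv_mem_nb_fold (edges : List (Int × Int)) (d : PySem.Dict Int (PySem.Set Int)) (x y : Int) :
    y ∈ (edges.foldl pvNbStep d).getD x PySem.Set.empty ↔
      y ∈ d.getD x PySem.Set.empty ∨ pvAdjP edges x y := by
  induction edges generalizing d with
  | nil => simp [pvAdjP]
  | cons e es ih =>
      rw [List.foldl_cons, ih, pv_mem_nbStep, pvAdjP_cons]
      simp only [Prod.ext_iff]
      constructor
      · rintro ((h | ⟨h1, h2⟩ | ⟨h1, h2⟩) | h)
        · exact Or.inl h
        · exact Or.inr (Or.inl (Or.inl ⟨h1.symm, h2.symm⟩))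
        · exact Or.inr (Or.inl (Or.inr ⟨h2.symm, h1.symm⟩))
        · exact Or.inr (Or.inr h)
      · rintro (h | (⟨h1, h2⟩ | ⟨h1, h2⟩) | h)
        · exact Or.inl (Or.inl h)
        · exact Or.inl (Or.inr (Or.inl ⟨h1.symm, h2.symm⟩))
        · exact Or.inl (Or.inr (Or.inr ⟨h2.symm, h1.symm⟩))
        · exact Or.inr h

lemma pv_mem_N (edges : List (Int × Int)) (x y : Int) :
    y ∈ pvN edges x ↔ pvAdjP edges x y := by
  unfold pvN pvNbD
  rw [pv_mem_nb_fold]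
  simp [PySem.Dict.getD_empty]

lemma pv_nodup_nb_fold (edges : List (Int × Int)) (d : PySem.Dict Int (PySem.Set Int))
    (hd : ∀ x, (d.getD x PySem.Set.empty).Nodup) (x : Int) :
    ((edges.foldl pvNbStep d).getD x PySem.Set.empty).Nodup := by
  induction edges generalizing d with
  | nil => exact hd x
  | cons e es ih =>
      rw [List.foldl_cons]
      refine ih (pvNbStep d e) (fun z => ?_)
      unfold pvNbStep
      simp only [PySem.Dict.getD_insert]
      split_ifs with a b c
      · exact PySem.Set.nodup_add _ _ (PySem.Set.nodup_add _ _ (hd _))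
      · exact PySem.Set.nodup_add _ _ (hd _)
      · exact PySem.Set.nodup_add _ _ (hd _)
      · exact hd z

lemma pv_nodup_N (edges : List (Int × Int)) (x : Int) : (pvN edges x).Nodup := by
  unfold pvN pvNbD
  exact pv_nodup_nb_fold _ _ (fun z => by simp [PySem.Dict.getD_empty]) x

lemma pv_mem_keys_fold (edges : List (Int × Int)) (d : PySem.Dict Int (PySem.Set Int)) (x : Int) :
    x ∈ (edges.foldl pvNbStep d).keys ↔ x ∈ d.keys ∨ ∃ e ∈ edges, x = e.1 ∨ x = e.2 := by
  induction edges generalizing d with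
  | nil => simp
  | cons e es ih =>
      rw [List.foldl_cons, ih]
      have hstep : x ∈ (pvNbStep d e).keys ↔ x ∈ d.keys ∨ x = e.1 ∨ x = e.2 := by
        unfold pvNbStep
        simp only [PySem.Dict.mem_keys_insert]
        tauto
      rw [hstep]
      simp only [List.mem_cons]
      aesop

lemma pv_mem_keys (edges : List (Int × Int)) (x : Int) :
    x ∈ (pvNbD edges).keys ↔ ∃ e ∈ edges, x = e.1 ∨ x = e.2 := by
  unfold pvNbD
  rw [pv_mem_keys_fold]
  simp [PySem.Dict.keys_empty]

-- node_colors stores the hash color of every endpoint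
lemma pv_ncD_fold (rand_a rand_b p num_colors : Int) (edges : List (Int × Int))
    (d : PySem.Dict Int Int) (x : Int) :
    (edges.foldl (fun d e =>
        (d.insert e.1 (pvHashColor rand_a rand_b p num_colors e.1)).insert e.2
          (pvHashColor rand_a rand_b p num_colors e.2)) d).getD x 0 =
      if ∃ e ∈ edges, x = e.1 ∨ x = e.2 then pvHashColor rand_a rand_b p num_colors x
      else d.getD x 0 := by
  induction edges generalizing d with
  | nil => simp
  | cons e es ih =>
      rw [List.foldl_cons, ih]
      simp only [PySem.Dict.getD_insert]
      by_cases hes : ∃ f ∈ es, x = f.1 ∨ x = f.2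
      · rw [if_pos hes, if_pos]
        obtain ⟨f, hf, h⟩ := hes
        exact ⟨f, List.mem_cons_of_mem _ hf, h⟩
      · rw [if_neg hes]
        by_cases h2 : x = e.2
        · rw [if_pos h2, if_pos ⟨e, List.mem_cons_self, Or.inr h2⟩, h2]
        · rw [if_neg h2]
          by_cases h1 : x = e.1
          · rw [if_pos h1, if_pos ⟨e, List.mem_cons_self, Or.inl h1⟩, h1]
          · rw [if_neg h1, if_neg]
            rintro ⟨f, hf, h⟩
            rcases List.mem_cons.mp hf with rfl | hf'
            · tauto
            · exact hes ⟨f, hf', h⟩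

lemma pv_ncD_getD (rand_a rand_b p num_colors : Int) (edges : List (Int × Int)) (x : Int)
    (hx : ∃ e ∈ edges, x = e.1 ∨ x = e.2) :
    (pvNcD rand_a rand_b p num_colors edges).getD x 0 =
      pvHashColor rand_a rand_b p num_colors x := by
  unfold pvNcD
  rw [pv_ncD_fold, if_pos hx]

-- the normalized pair set
lemma pv_mem_pr_fold (edges : List (Int × Int)) (s : PySem.Set (Int × Int)) (a b : Int) :
    (a, b) ∈ edges.foldl pvPrStep s ↔ (a, b) ∈ s ∨ (a < b ∧ pvAdjP edges a b) := by
  induction edges generalizing s with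
  | nil => simp [pvAdjP]
  | cons e es ih =>
      rw [List.foldl_cons, ih]
      have hstep : (a, b) ∈ pvPrStep s e ↔
          (a, b) ∈ s ∨ (a < b ∧ (e = (a, b) ∨ e = (b, a))) := by
        unfold pvPrStep
        split_ifs with hne hlt
        · rw [PySem.Set.mem_add]
          simp only [Prod.ext_iff]
          constructor
          · rintro (h | h)
            · exact Or.inl h
            · exact Or.inr (by omega)
          · rintro (h | h)
            · exact Or.inl h
            · exact Or.inr (by omega)
        · rw [PySem.Set.mem_add]
          simp only [Prod.ext_iff]
          constructor
          · rintro (h | h)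
            · exact Or.inl h
            · exact Or.inr (by omega)
          · rintro (h | h)
            · exact Or.inl h
            · exact Or.inr (by omega)
        · simp only [Prod.ext_iff]
          constructor
          · exact Or.inl
          · rintro (h | h)
            · exact h
            · exfalso; rw [not_not] at hne; omega
      rw [hstep, pvAdjP_cons]
      tauto

lemma pv_mem_prS (edges : List (Int × Int)) (a b : Int) :
    (a, b) ∈ pvPrS edges ↔ a < b ∧ pvAdjP edges a b := by
  unfold pvPrS
  rw [pv_mem_pr_fold]
  simp [PySem.Set.empty]

-- the canonical per-pair triangle count
def pvT (colors : List Int) (edges : List (Int × Int)) (rand_a rand_b p num_colors v u : Int) : Int :=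
  ((pvN edges u).countP (fun w =>
    decide (u < w) && PySem.Set.contains (pvN edges v) w &&
      pvColOK colors rand_a rand_b p num_colors v u w) : Int)

-- A's value as a sum of pvT over its (v, u) pair list
def pvPairsA (edges : List (Int × Int)) : List (Int × Int) :=
  (pvNbD edges).keys.flatMap (fun v =>
    ((pvN edges v).filter (fun u => decide (v < u))).map (fun u => (v, u)))

lemma pv_adj_endpoint (edges : List (Int × Int)) (x y : Int) (h : pvAdjP edges x y) :
    ∃ e ∈ edges, y = e.1 ∨ y = e.2 := by
  obtain ⟨e, he, h | h⟩ := h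
  · exact ⟨e, he, Or.inr (by simp [h])⟩
  · exact ⟨e, he, Or.inl (by simp [h])⟩

-- the innermost w-loop of A, on endpoints, is acc + pvT
lemma pv_innerA (colors : List Int) (edges : List (Int × Int)) (rand_a rand_b p num_colors : Int)
    (v u : Int) (acc : Int)
    (hv : ∃ e ∈ edges, v = e.1 ∨ v = e.2) (hu : ∃ e ∈ edges, u = e.1 ∨ u = e.2) :
    ((pvNbD edges).getD u PySem.Set.empty).foldl (fun acc w =>
        if u < w ∧ PySem.Set.contains ((pvNbD edges).getD v PySem.Set.empty) w = true then
          if colors = PySem.List.sorted [(pvNcD rand_a rand_b p num_colors edges).getD u 0,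
              (pvNcD rand_a rand_b p num_colors edges).getD v 0,
              (pvNcD rand_a rand_b p num_colors edges).getD w 0] (fun x => x) false
          then acc + 1 else acc
        else acc) acc =
      acc + pvT colors edges rand_a rand_b p num_colors v u := by
  have hcong : ∀ (a : Int), ∀ w ∈ (pvNbD edges).getD u PySem.Set.empty,
      (if u < w ∧ PySem.Set.contains ((pvNbD edges).getD v PySem.Set.empty) w = true then
        if colors = PySem.List.sorted [(pvNcD rand_a rand_b p num_colors edges).getD u 0,
            (pvNcD rand_a rand_b p num_colors edges).getD v 0,
            (pvNcD rand_a rand_b p num_colors edges).getD w 0] (fun x => x) false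
        then a + 1 else a
      else a) =
      (if (u < w ∧ PySem.Set.contains ((pvNbD edges).getD v PySem.Set.empty) w = true) ∧
          pvColOK colors rand_a rand_b p num_colors v u w = true then a + 1 else a) := by
    intro a w hw
    have hwadj : pvAdjP edges u w := (pv_mem_N edges u w).mp hw
    have hwend : ∃ e ∈ edges, w = e.1 ∨ w = e.2 := pv_adj_endpoint edges u w hwadj
    rw [pv_ncD_getD rand_a rand_b p num_colors edges u hu,
        pv_ncD_getD rand_a rand_b p num_colors edges v hv,
        pv_ncD_getD rand_a rand_b p num_colors edges w hwend]
    by_cases hP : u < w ∧ PySem.Set.contains ((pvNbD edges).getD v PySem.Set.empty) w = true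
    · by_cases hQ : colors = PySem.List.sorted [pvHashColor rand_a rand_b p num_colors u,
          pvHashColor rand_a rand_b p num_colors v,
          pvHashColor rand_a rand_b p num_colors w] (fun x => x) false
      · rw [if_pos hP, if_pos hQ, if_pos ⟨hP, by simp [pvColOK, hQ]⟩]
      · rw [if_pos hP, if_neg hQ, if_neg]
        rintro ⟨-, hc⟩
        exact hQ (by simpa [pvColOK] using hc)
    · rw [if_neg hP, if_neg]
      rintro ⟨hP', -⟩
      exact hP hP'
  rw [PySem.List.foldl_congr_mem _ _ _ _ (fun a w hw => hcong a w hw),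
      PySem.List.foldl_ite_add_one]
  congr 1
  unfold pvT pvN
  norm_cast
  apply List.countP_congr
  intro w _
  simp [pvColOK, Bool.and_assoc]

-- the u-loop of A over v's neighbor set, for v a key
lemma pv_midA (colors : List Int) (edges : List (Int × Int)) (rand_a rand_b p num_colors : Int)
    (v : Int) (acc : Int) (hv : ∃ e ∈ edges, v = e.1 ∨ v = e.2) :
    ((pvNbD edges).getD v PySem.Set.empty).foldl (fun acc u =>
      if v < u then
        ((pvNbD edges).getD u PySem.Set.empty).foldl (fun acc w =>
          if u < w ∧ PySem.Set.contains ((pvNbD edges).getD v PySem.Set.empty) w = true then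
            if colors = PySem.List.sorted [(pvNcD rand_a rand_b p num_colors edges).getD u 0,
                (pvNcD rand_a rand_b p num_colors edges).getD v 0,
                (pvNcD rand_a rand_b p num_colors edges).getD w 0] (fun x => x) false
            then acc + 1 else acc
          else acc) acc
      else acc) acc =
      acc + (((pvN edges v).filter (fun u => decide (v < u))).map
        (fun u => pvT colors edges rand_a rand_b p num_colors v u)).sum := by
  have hcong : ∀ (a : Int), ∀ u ∈ (pvNbD edges).getD v PySem.Set.empty,
      (if v < u then
        ((pvNbD edges).getD u PySem.Set.empty).foldl (fun acc w =>
          if u < w ∧ PySem.Set.contains ((pvNbD edges).getD v PySem.Set.empty) w = true then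
            if colors = PySem.List.sorted [(pvNcD rand_a rand_b p num_colors edges).getD u 0,
                (pvNcD rand_a rand_b p num_colors edges).getD v 0,
                (pvNcD rand_a rand_b p num_colors edges).getD w 0] (fun x => x) false
            then acc + 1 else acc
          else acc) a
      else a) =
      (if v < u then a + pvT colors edges rand_a rand_b p num_colors v u else a) := by
    intro a u hu
    by_cases hvu : v < u
    · rw [if_pos hvu, if_pos hvu]
      exact pv_innerA colors edges rand_a rand_b p num_colors v u a hv
        (pv_adj_endpoint edges v u ((pv_mem_N edges v u).mp hu))
    · rw [if_neg hvu, if_neg hvu]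
  rw [PySem.List.foldl_congr_mem _ _ _ _ (fun a u hu => hcong a u hu),
      PySem.List.foldl_ite_eq_foldl_filter (fun u => v < u)
        (fun acc u => acc + pvT colors edges rand_a rand_b p num_colors v u),
      PySem.List.foldl_add]
  rfl

lemma pv_sum_flatMap (K : List Int) (g : Int → List Int) :
    (K.flatMap g).sum = (K.map (fun v => (g v).sum)).sum := by
  induction K with
  | nil => simp
  | cons v K ih => simp [List.flatMap_cons, List.sum_append, ih]

lemma pv_A_eq_sum (colors : List Int) (edges : List (Int × Int)) (rand_a rand_b p num_colors : Int) :
    CountTriangles2 colors edges rand_a rand_b p num_colors =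
      ((pvPairsA edges).map (fun q => pvT colors edges rand_a rand_b p num_colors q.1 q.2)).sum := by
  have hA : CountTriangles2 colors edges rand_a rand_b p num_colors =
      (pvNbD edges).keys.foldl (fun acc v =>
        ((pvNbD edges).getD v PySem.Set.empty).foldl (fun acc u =>
          if v < u then
            ((pvNbD edges).getD u PySem.Set.empty).foldl (fun acc w =>
              if u < w ∧ PySem.Set.contains ((pvNbD edges).getD v PySem.Set.empty) w = true then
                if colors = PySem.List.sorted [(pvNcD rand_a rand_b p num_colors edges).getD u 0,
                    (pvNcD rand_a rand_b p num_colors edges).getD v 0,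
                    (pvNcD rand_a rand_b p num_colors edges).getD w 0] (fun x => x) false
                then acc + 1 else acc
              else acc) acc
          else acc) acc) 0 := by
    simp only [CountTriangles2, pvBuildA_eq]
  rw [hA]
  have hcong : ∀ (a : Int), ∀ v ∈ (pvNbD edges).keys,
      (((pvNbD edges).getD v PySem.Set.empty).foldl (fun acc u =>
          if v < u then
            ((pvNbD edges).getD u PySem.Set.empty).foldl (fun acc w =>
              if u < w ∧ PySem.Set.contains ((pvNbD edges).getD v PySem.Set.empty) w = true then
                if colors = PySem.List.sorted [(pvNcD rand_a rand_b p num_colors edges).getD u 0,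
                    (pvNcD rand_a rand_b p num_colors edges).getD v 0,
                    (pvNcD rand_a rand_b p num_colors edges).getD w 0] (fun x => x) false
                then acc + 1 else acc
              else acc) acc
          else acc) a) =
      (a + (((pvN edges v).filter (fun u => decide (v < u))).map
        (fun u => pvT colors edges rand_a rand_b p num_colors v u)).sum) := by
    intro a v hv
    exact pv_midA colors edges rand_a rand_b p num_colors v a ((pv_mem_keys edges v).mp hv)
  rw [PySem.List.foldl_congr_mem _ _ _ _ (fun a v hv => hcong a v hv),
      PySem.List.foldl_add, zero_add]
  unfold pvPairsA
  rw [List.map_flatMap, pv_sum_flatMap]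
  congr 1
  apply List.map_congr_left
  intro v _
  rw [List.map_map]
  rfl

-- B side: the wedge loop on a strictly increasing list counts, for each u, the later
-- elements passing the check — i.e. the elements of nb above u
lemma pv_wedgeLoop_eq (c : Int → Int → Bool) (nb : List Int) (acc : Int)
    (hs : nb.Pairwise (· < ·)) :
    pvWedgeLoop c nb acc =
      acc + (nb.map (fun u => ((nb.filter (fun w => decide (u < w))).countP (c u) : Int))).sum := by
  induction nb generalizing acc with
  | nil => simp [pvWedgeLoop]
  | cons u rest ih =>
      rcases List.pairwise_cons.mp hs with ⟨hu, hrest⟩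
      rw [pvWedgeLoop, PySem.List.foldl_if_add_one, ih _ hrest]
      have h1 : (u :: rest).filter (fun w => decide (u < w)) = rest := by
        rw [List.filter_cons]
        simp only [lt_irrefl, decide_false]
        exact List.filter_eq_self.mpr (fun w hw => by simpa using hu w hw)
      have h2 : ∀ u' ∈ rest,
          (u :: rest).filter (fun w => decide (u' < w)) = rest.filter (fun w => decide (u' < w)) := by
        intro u' hu'
        rw [List.filter_cons]
        have : ¬ u' < u := not_lt.mpr (le_of_lt (hu u' hu'))
        simp [this]
      simp only [List.map_cons, List.sum_cons, h1]
      have h3 : rest.map (fun u'' =>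
            ((((u :: rest).filter (fun w => decide (u'' < w))).countP (c u'') : Nat) : Int)) =
          rest.map (fun u'' =>
            (((rest.filter (fun w => decide (u'' < w))).countP (c u'') : Nat) : Int)) :=
        List.map_congr_left (fun u' hu' => by rw [h2 u' hu'])
      rw [h3]
      ring

-- Python guarantees of B's per-node list nb = sorted(x for x in adj[v] if x > v)
lemma pv_nb_perm (edges : List (Int × Int)) (v : Int) :
    (PySem.List.sorted ((pvN edges v).filter (fun x => decide (v < x))) (fun x => x) false).Perm
      ((pvN edges v).filter (fun x => decide (v < x))) :=
  PySem.List.sorted_perm _ _ _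

lemma pv_nb_sorted (edges : List (Int × Int)) (v : Int) :
    (PySem.List.sorted ((pvN edges v).filter (fun x => decide (v < x))) (fun x => x) false).Pairwise
      (· < ·) := by
  have hnd : (PySem.List.sorted ((pvN edges v).filter (fun x => decide (v < x)))
      (fun x => x) false).Nodup :=
    (pv_nb_perm edges v).nodup_iff.mpr (List.Nodup.filter _ (pv_nodup_N edges v))
  have hle := PySem.List.sorted_pairwise ((pvN edges v).filter (fun x => decide (v < x)))
    (fun x => x) (κ := Int)
  exact (List.Pairwise.and_mem.mp hle).imp₂ (fun a b h1 h2 => lt_of_le_of_ne h1.2.2 h2)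
    hnd

-- B's check, counted over the elements of nb above u, is pvT v u (for u a higher neighbor of v)
lemma pv_countB_eq_pvT (colors : List Int) (edges : List (Int × Int))
    (rand_a rand_b p num_colors v u : Int) (hvu : v < u) :
    ((((pvN edges v).filter (fun x => decide (v < x))).filter
        (fun w => decide (u < w))).countP (fun w =>
          PySem.Set.contains (pvPrS edges) (u, w) &&
            pvColOK colors rand_a rand_b p num_colors v u w) : Int) =
      pvT colors edges rand_a rand_b p num_colors v u := by
  unfold pvT
  norm_cast
  rw [List.countP_eq_length_filter, List.countP_eq_length_filter]
  apply List.Perm.length_eq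
  apply (List.perm_ext_iff_of_nodup
    (List.Nodup.filter _ (List.Nodup.filter _ (List.Nodup.filter _ (pv_nodup_N edges v))))
    (List.Nodup.filter _ (pv_nodup_N edges u))).mpr
  intro w
  have hcv : ∀ z, PySem.Set.contains (pvN edges z) w = true ↔ w ∈ pvN edges z := fun z =>
    List.contains_iff_mem
  have hce : PySem.Set.contains (pvPrS edges) (u, w) = true ↔ (u, w) ∈ pvPrS edges :=
    List.contains_iff_mem
  simp only [List.mem_filter, Bool.and_eq_true, decide_eq_true_eq, hce, hcv, pv_mem_prS,
    pv_mem_N]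
  constructor
  · rintro ⟨⟨⟨hwv, hvw⟩, huw⟩, ⟨huw2, hadj⟩, hc⟩
    exact ⟨hadj, ⟨huw, hwv⟩, hc⟩
  · rintro ⟨hwu, ⟨huw, hwv⟩, hc⟩
    exact ⟨⟨⟨hwv, by omega⟩, huw⟩, ⟨huw, hwu⟩, hc⟩

-- B equals the same sum over pvPairsA
lemma pv_B_eq_sum (colors : List Int) (edges : List (Int × Int)) (rand_a rand_b p num_colors : Int) :
    CountTriangles2_alt colors edges rand_a rand_b p num_colors =
      ((pvPairsA edges).map (fun q => pvT colors edges rand_a rand_b p num_colors q.1 q.2)).sum := by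
  have hB : CountTriangles2_alt colors edges rand_a rand_b p num_colors =
      (pvNbD edges).keys.foldl (fun acc v =>
        pvWedgeLoop (fun u w =>
            PySem.Set.contains (pvPrS edges) (u, w) &&
              pvColOK colors rand_a rand_b p num_colors v u w)
          (PySem.List.sorted ((pvN edges v).filter (fun x => decide (v < x))) (fun x => x) false)
          acc) 0 := by
    simp only [CountTriangles2_alt, pvBuildB_eq, pvColOK, pvN]
  rw [hB]
  have hstep : ∀ (a : Int) (v : Int),
      pvWedgeLoop (fun u w =>
          PySem.Set.contains (pvPrS edges) (u, w) &&
            pvColOK colors rand_a rand_b p num_colors v u w)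
        (PySem.List.sorted ((pvN edges v).filter (fun x => decide (v < x))) (fun x => x) false)
        a =
      a + (((pvN edges v).filter (fun u => decide (v < u))).map
        (fun u => pvT colors edges rand_a rand_b p num_colors v u)).sum := by
    intro a v
    set F := (pvN edges v).filter (fun x => decide (v < x)) with hF
    set nb := PySem.List.sorted F (fun x => x) false with hnb
    rw [pv_wedgeLoop_eq _ _ _ (pv_nb_sorted edges v)]
    congr 1
    have hmapcong : ∀ u ∈ nb,
        ((nb.filter (fun w => decide (u < w))).countP (fun w =>
            PySem.Set.contains (pvPrS edges) (u, w) &&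
              pvColOK colors rand_a rand_b p num_colors v u w) : Int) =
          pvT colors edges rand_a rand_b p num_colors v u := by
      intro u hu
      have hvu : v < u := by
        have := (pv_nb_perm edges v).mem_iff.mp hu
        simpa using (List.mem_filter.mp this).2
      have hperm : (nb.filter (fun w => decide (u < w))).Perm
          (F.filter (fun w => decide (u < w))) := (pv_nb_perm edges v).filter _
      rw [show ((nb.filter (fun w => decide (u < w))).countP (fun w =>
            PySem.Set.contains (pvPrS edges) (u, w) &&
              pvColOK colors rand_a rand_b p num_colors v u w)) =
          ((F.filter (fun w => decide (u < w))).countP (fun w =>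
            PySem.Set.contains (pvPrS edges) (u, w) &&
              pvColOK colors rand_a rand_b p num_colors v u w)) from hperm.countP_eq _]
      exact pv_countB_eq_pvT colors edges rand_a rand_b p num_colors v u hvu
    rw [List.map_congr_left hmapcong]
    exact ((pv_nb_perm edges v).map _).sum_eq
  rw [PySem.List.foldl_congr_mem _ _ _ _ (fun a v _ => hstep a v),
      PySem.List.foldl_add, zero_add]
  unfold pvPairsA
  rw [List.map_flatMap, pv_sum_flatMap]
  congr 1
  apply List.map_congr_left
  intro v _
  rw [List.map_map]
  rfl

-- ===== VERDICT (by name: the statement is the Claim_ definition above) =====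
theorem CountTriangles2_spec : Claim_equal_CountTriangles2 := by
  intro colors edges ra rb p ncol _hdom _hpre
  unfold Spec_CountTriangles2
  rw [pv_A_eq_sum, pv_B_eq_sum]
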